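-- pv_equiv track=rewrite | github.com/johnw42/emacs | src/update.py | ArgRx
-- ===== SOURCE A (Python) =====
-- arg_rx_cache = {}
--
-- def ArgRx(depth, single_arg):
--     key = (depth, single_arg)
--     found = arg_rx_cache.get(key)
--     if found is None:
--         if depth == 0:
--             return r"[^=,;()]*" if single_arg else r"[^;()]*"
--         subn = ArgRx(depth - 1, False)
--         sub1 = ArgRx(depth - 1, True) if single_arg else subn
--         found = r"(?:" + sub1 + r"(?:\(" + subn + r"\)" + sub1 + r")*)"
--         arg_rx_cache[key] = found
--     return found
-- ===== SOURCE B (Python) =====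
-- def ArgRx(depth, single_arg):
--     F = r"[^;()]*"
--     T = r"[^=,;()]*"
--     d = depth
--     while d != 0:
--         F, T = (r"(?:" + F + r"(?:\(" + F + r"\)" + F + r")*)",
--                 r"(?:" + T + r"(?:\(" + F + r"\)" + T + r")*)")
--         d -= 1
--     return T if single_arg else F
-- ===== Notes on version B (the rewrite author's own statement) =====
-- stated objective: simpler
-- what changed: Bottom-up iterative builder: one loop counting depth down to zero while keeping the two running strings (the single_arg False/True forms), instead of top-down recursion with a module-level cache; Pre_ excludes negative depth, where A raises RecursionError and B's loop never reaches zero.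
import Mathlib
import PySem

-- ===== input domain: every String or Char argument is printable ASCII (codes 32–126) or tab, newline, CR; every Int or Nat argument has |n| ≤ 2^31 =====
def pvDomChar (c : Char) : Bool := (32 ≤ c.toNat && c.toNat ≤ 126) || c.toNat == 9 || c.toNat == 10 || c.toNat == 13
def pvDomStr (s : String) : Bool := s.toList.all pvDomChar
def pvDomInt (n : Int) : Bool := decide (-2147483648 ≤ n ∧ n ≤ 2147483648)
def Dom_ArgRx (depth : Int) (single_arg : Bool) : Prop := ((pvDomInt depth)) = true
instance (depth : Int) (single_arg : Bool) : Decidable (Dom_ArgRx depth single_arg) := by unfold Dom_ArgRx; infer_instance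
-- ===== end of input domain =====

-- B replaces A's top-down recursion (with a cache) by a bottom-up loop keeping both forms; objective: simpler.

-- ===== PORT A =====
-- A's recursion on depth (the cache only memoises identical results and never changes the value,
-- so it is not modelled; the recursion structure and string construction are transcribed literally).
def argRxRecA : Nat → Bool → String
  | 0, single_arg => if single_arg then "[^=,;()]*" else "[^;()]*"
  | n + 1, single_arg =>
    let subn := argRxRecA n false
    let sub1 := if single_arg then argRxRecA n true else subn
    "(?:" ++ sub1 ++ "(?:\\(" ++ subn ++ "\\)" ++ sub1 ++ ")*)"

def ArgRx (depth : Int) (single_arg : Bool) : String :=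
  argRxRecA depth.toNat single_arg

-- ===== PORT B =====
-- Source B's while loop counts d from depth down to 0, updating the pair (F, T) each iteration.
-- Ported as structural recursion on the iteration count depth.toNat: exact for 0 ≤ depth (= Pre_);
-- for negative depth the Python loop never terminates, which is not portable (outside Pre_).
def argRxStepB (p : String × String) : String × String :=
  ("(?:" ++ p.1 ++ "(?:\\(" ++ p.1 ++ "\\)" ++ p.1 ++ ")*)",
   "(?:" ++ p.2 ++ "(?:\\(" ++ p.1 ++ "\\)" ++ p.2 ++ ")*)")

def argRxLoopB : Nat → String × String
  | 0 => ("[^;()]*", "[^=,;()]*")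
  | n + 1 => argRxStepB (argRxLoopB n)

def ArgRx_alt (depth : Int) (single_arg : Bool) : String :=
  if single_arg then (argRxLoopB depth.toNat).2 else (argRxLoopB depth.toNat).1

-- ===== PRECONDITION & SPEC =====
-- Pre_ excludes negative depth, on which A recurses without reaching the base case and raises RecursionError
-- (and B's countdown loop never reaches zero).
def Pre_ArgRx (depth : Int) (single_arg : Bool) : Prop := 0 ≤ depth
instance (depth : Int) (single_arg : Bool) : Decidable (Pre_ArgRx depth single_arg) := by unfold Pre_ArgRx; infer_instance
def pvWitness_ArgRx : Int × Bool := (2, true)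

def Spec_ArgRx (depth : Int) (single_arg : Bool) (out : String) : Prop := out = ArgRx_alt depth single_arg
instance (depth : Int) (single_arg : Bool) (out : String) : Decidable (Spec_ArgRx depth single_arg out) := by unfold Spec_ArgRx; infer_instance

-- ===== CLAIM (what is proved, stated in full; the proofs are below) =====
def Claim_equal_ArgRx : Prop := ∀ (depth : Int) (single_arg : Bool), Dom_ArgRx depth single_arg → Pre_ArgRx depth single_arg → Spec_ArgRx depth single_arg (ArgRx depth single_arg)

-- ===== LEMMAS AND PROOFS =====
theorem argRxLoopB_eq (n : Nat) :
    argRxLoopB n = (argRxRecA n false, argRxRecA n true) := by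
  induction n with
  | zero => rfl
  | succ k ih => simp [argRxLoopB, ih, argRxStepB, argRxRecA]

-- ===== VERDICT (by name: the statement is the Claim_ definition above) =====
theorem ArgRx_spec : Claim_equal_ArgRx := by
  intro depth single_arg _ _
  unfold Spec_ArgRx ArgRx ArgRx_alt
  rw [argRxLoopB_eq]
  cases single_arg <;> rfl
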